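-- pv_equiv track=rewrite | github.com/RobinCodes/collatz | generalized_map_enumerator.py | analyze_single_a
-- ===== SOURCE A (Python) =====
-- def collatz_like_map(a, b, n, max_steps=5000):
--     orbit = []
--     seen = {}
--     steps = 0
--
--     while n not in seen and steps < max_steps:
--         seen[n] = steps
--         orbit.append(n)
--         if n % 2 == 0:
--             n //= 2
--         else:
--             n = a * n + b
--         steps += 1
--
--     if steps >= max_steps:
--         return None
--
--     return orbit, seen[n]
--
-- def analyze_single_a(args):
--     """
--     Worker function: analyzes one a for fixed b.
--     Returns (a, converging_seeds, cycles)
--     """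
--     a, b, odd_seeds, max_steps = args
--
--     converging_seeds = []
--     cycles = []
--     cycle_reprs = set()
--
--     for n in odd_seeds:
--         res = collatz_like_map(a, b, n, max_steps=max_steps)
--         if res is None:
--             continue
--
--         orbit, cycle_start = res
--         cycle = orbit[cycle_start:]
--
--         m = min(cycle)
--         i = cycle.index(m)
--         cycle_norm = tuple(cycle[i:] + cycle[:i])
--
--         if cycle_norm not in cycle_reprs:
--             cycle_reprs.add(cycle_norm)
--             cycles.append((cycle_norm, n))
--
--         converging_seeds.append(n)
--
--     return a, converging_seeds, cycles
-- ===== SOURCE B (Python) =====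
-- def _step(a, b, n):
--     return n // 2 if n % 2 == 0 else a * n + b
--
--
-- def _floyd_map(a, b, n0, max_steps):
--     # Tortoise-and-hare: find a meeting seq(i) == seq(2i), then recover
--     # mu (cycle start) and lam (cycle length); first-repeat index is mu+lam.
--     slow = _step(a, b, n0)
--     fast = _step(a, b, _step(a, b, n0))
--     i = 1
--     while slow != fast:
--         if i >= max_steps:
--             return None
--         slow = _step(a, b, slow)
--         fast = _step(a, b, _step(a, b, fast))
--         i += 1
--     # phase 2: mu
--     mu = 0
--     slow = n0
--     while slow != fast:
--         slow = _step(a, b, slow)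
--         fast = _step(a, b, fast)
--         mu += 1
--     # phase 3: lam
--     lam = 1
--     fast = _step(a, b, slow)
--     while slow != fast:
--         fast = _step(a, b, fast)
--         lam += 1
--     if mu + lam >= max_steps:
--         return None
--     # regenerate the orbit prefix n_0 .. n_{mu+lam-1}
--     orbit = []
--     x = n0
--     for _ in range(mu + lam):
--         orbit.append(x)
--         x = _step(a, b, x)
--     return orbit, mu
--
--
-- def analyze_single_a(args):
--     a, b, odd_seeds, max_steps = args
--
--     converging_seeds = []
--     cycles = []
--     cycle_reprs = set()
--
--     for n in odd_seeds:
--         res = _floyd_map(a, b, n, max_steps)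
--         if res is None:
--             continue
--
--         orbit, cycle_start = res
--         cycle = orbit[cycle_start:]
--
--         m = min(cycle)
--         i = cycle.index(m)
--         cycle_norm = tuple(cycle[i:] + cycle[:i])
--
--         if cycle_norm not in cycle_reprs:
--             cycle_reprs.add(cycle_norm)
--             cycles.append((cycle_norm, n))
--
--         converging_seeds.append(n)
--
--     return a, converging_seeds, cycles
-- ===== Notes on version B (the rewrite author's own statement) =====
-- stated objective: alternative
-- what changed: The per-seed cycle detector is replaced by Floyd's tortoise-and-hare: instead of storing every orbit value in a dict and stopping at the first repeat, B finds a slow/fast pointer collision within the step budget, recovers the cycle start mu and cycle length lam, and regenerates the orbit prefix of length mu+lam from the seed; the outer per-seed post-processing (min-rotation normalization, dedup set, converging list) is unchanged.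
import Mathlib
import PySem

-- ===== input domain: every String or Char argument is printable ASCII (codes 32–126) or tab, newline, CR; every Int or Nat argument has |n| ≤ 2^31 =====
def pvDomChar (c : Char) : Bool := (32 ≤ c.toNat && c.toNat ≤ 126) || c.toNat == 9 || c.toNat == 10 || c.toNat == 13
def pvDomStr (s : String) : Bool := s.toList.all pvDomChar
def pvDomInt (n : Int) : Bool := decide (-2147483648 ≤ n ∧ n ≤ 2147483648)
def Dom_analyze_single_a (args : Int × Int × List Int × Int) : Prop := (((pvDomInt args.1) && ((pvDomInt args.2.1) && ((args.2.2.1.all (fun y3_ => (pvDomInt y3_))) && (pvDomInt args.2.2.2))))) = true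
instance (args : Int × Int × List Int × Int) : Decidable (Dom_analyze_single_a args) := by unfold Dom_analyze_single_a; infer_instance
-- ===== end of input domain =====

-- B replaces A's hash-map cycle detector by Floyd's tortoise-and-hare (O(1) auxiliary
-- state per seed instead of a dict of the whole orbit); the per-seed post-processing
-- (min-rotation normalization, dedup, converging list) is unchanged. Equivalence is
-- about the return value; neither version mutates its argument.

-- ===== PORT A =====
-- post-loop code of collatz_like_map: 'if steps >= max_steps: return None; return orbit, seen[n]'
-- (the inner 'none' arm is unreachable: when the loop exits with steps < max_steps, n is a key of seen)
def pvPostA (maxSteps n : Int) (seen : PySem.Dict Int Int) (orbit : List Int) (steps : Int) :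
    Option (List Int × Int) :=
  if steps ≥ maxSteps then none
  else
    match PySem.Dict.get? seen n with
    | some j => some (orbit, j)
    | none => none

-- the while loop of collatz_like_map; fuel = maxSteps.toNat bounds the iterations
-- (each iteration requires steps < max_steps and increments steps)
def pvLoopA (a b maxSteps : Int) :
    Nat → Int → PySem.Dict Int Int → List Int → Int → Option (List Int × Int)
  | 0, n, seen, orbit, steps => pvPostA maxSteps n seen orbit steps
  | fuel + 1, n, seen, orbit, steps =>
    if PySem.Dict.contains seen n = false ∧ steps < maxSteps then
      pvLoopA a b maxSteps fuel
        (if PySem.Int.mod n 2 = 0 then PySem.Int.floordiv n 2 else a * n + b)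
        (PySem.Dict.insert seen n steps) (orbit ++ [n]) (steps + 1)
    else pvPostA maxSteps n seen orbit steps

def pvCollatzA (a b n maxSteps : Int) : Option (List Int × Int) :=
  pvLoopA a b maxSteps maxSteps.toNat n PySem.Dict.empty [] 0

-- the body of A's 'for n in odd_seeds' loop (state: converging_seeds, cycles, cycle_reprs);
-- the two 'none' fallthrough arms are unreachable (cycle is nonempty and mval ∈ cycle)
def pvBodyA (a b maxSteps : Int)
    (st : List Int × List (List Int × Int) × PySem.Set (List Int)) (n : Int) :
    List Int × List (List Int × Int) × PySem.Set (List Int) :=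
  match pvCollatzA a b n maxSteps with
  | none => st
  | some (orbit, cycle_start) =>
    let cycle := PySem.List.slice orbit (some cycle_start) none
    match PySem.List.min? cycle (fun x => x) with
    | none => st
    | some mval =>
      match PySem.List.index? cycle mval with
      | none => st
      | some i =>
        let cycle_norm := PySem.List.slice cycle (some (i : Int)) none ++
          PySem.List.slice cycle none (some (i : Int))
        if PySem.Set.contains st.2.2 cycle_norm then (st.1 ++ [n], st.2.1, st.2.2)
        else (st.1 ++ [n], st.2.1 ++ [(cycle_norm, n)], PySem.Set.add st.2.2 cycle_norm)

def analyze_single_a (args : Int × Int × List Int × Int) : Int × List Int × (List (List Int × Int)) :=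
  match args with
  | (a, b, odd_seeds, max_steps) =>
    let st := odd_seeds.foldl (pvBodyA a b max_steps) ([], [], PySem.Set.empty)
    (a, st.1, st.2.1)

-- ===== PORT B =====
-- _step
def pvStep (a b n : Int) : Int :=
  if PySem.Int.mod n 2 = 0 then PySem.Int.floordiv n 2 else a * n + b

-- phase 1 of _floyd_map: advance tortoise/hare until they meet (returns the hare's value)
-- or the step budget is exhausted; fuel = maxSteps.toNat (the '| 0 => none' arm is
-- unreachable: when fuel runs out, i ≥ maxSteps already holds)
def pvPhase1 (a b maxSteps : Int) (fuel : Nat) (slow fast i : Int) : Option Int :=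
  if slow = fast then some fast
  else if i ≥ maxSteps then none
  else
    match fuel with
    | 0 => none
    | fuel' + 1 =>
      pvPhase1 a b maxSteps fuel' (pvStep a b slow) (pvStep a b (pvStep a b fast)) (i + 1)

-- phase 2: reset slow to the seed, advance both until they meet; returns (slow, mu)
-- (fuel is an upper bound on mu; the fuel-exhausted arm is unreachable)
def pvPhase2 (a b : Int) (fuel : Nat) (slow fast mu : Int) : Int × Int :=
  if slow = fast then (slow, mu)
  else
    match fuel with
    | 0 => (slow, mu)
    | fuel' + 1 => pvPhase2 a b fuel' (pvStep a b slow) (pvStep a b fast) (mu + 1)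

-- phase 3: walk once around the cycle to measure lam (fuel bounds lam; exhausted arm unreachable)
def pvPhase3 (a b : Int) (fuel : Nat) (slow fast lam : Int) : Int :=
  if slow = fast then lam
  else
    match fuel with
    | 0 => lam
    | fuel' + 1 => pvPhase3 a b fuel' slow (pvStep a b fast) (lam + 1)

-- 'for _ in range(mu+lam): orbit.append(x); x = _step(a,b,x)'
def pvRegen (a b : Int) : Nat → Int → List Int → List Int
  | 0, _, orbit => orbit
  | k + 1, x, orbit => pvRegen a b k (pvStep a b x) (orbit ++ [x])

def pvFloyd (a b n maxSteps : Int) : Option (List Int × Int) :=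
  match pvPhase1 a b maxSteps maxSteps.toNat (pvStep a b n) (pvStep a b (pvStep a b n)) 1 with
  | none => none
  | some fast =>
    match pvPhase2 a b (maxSteps.toNat + 1) n fast 0 with
    | (slow, mu) =>
      let lam := pvPhase3 a b (maxSteps.toNat + 1) slow (pvStep a b slow) 1
      if mu + lam ≥ maxSteps then none
      else some (pvRegen a b (mu + lam).toNat n [], mu)

-- the body of B's 'for n in odd_seeds' loop — same post-processing as A, calling _floyd_map
def pvBodyB (a b maxSteps : Int)
    (st : List Int × List (List Int × Int) × PySem.Set (List Int)) (n : Int) :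
    List Int × List (List Int × Int) × PySem.Set (List Int) :=
  match pvFloyd a b n maxSteps with
  | none => st
  | some (orbit, cycle_start) =>
    let cycle := PySem.List.slice orbit (some cycle_start) none
    match PySem.List.min? cycle (fun x => x) with
    | none => st
    | some mval =>
      match PySem.List.index? cycle mval with
      | none => st
      | some i =>
        let cycle_norm := PySem.List.slice cycle (some (i : Int)) none ++
          PySem.List.slice cycle none (some (i : Int))
        if PySem.Set.contains st.2.2 cycle_norm then (st.1 ++ [n], st.2.1, st.2.2)
        else (st.1 ++ [n], st.2.1 ++ [(cycle_norm, n)], PySem.Set.add st.2.2 cycle_norm)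

def analyze_single_a_alt (args : Int × Int × List Int × Int) : Int × List Int × (List (List Int × Int)) :=
  match args with
  | (a, b, odd_seeds, max_steps) =>
    let st := odd_seeds.foldl (pvBodyB a b max_steps) ([], [], PySem.Set.empty)
    (a, st.1, st.2.1)

-- ===== PRECONDITION & SPEC =====
def Spec_analyze_single_a (args : Int × Int × List Int × Int) (out : Int × List Int × (List (List Int × Int))) : Prop := out = analyze_single_a_alt args
instance (args : Int × Int × List Int × Int) (out : Int × List Int × (List (List Int × Int))) : Decidable (Spec_analyze_single_a args out) := by unfold Spec_analyze_single_a; infer_instance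

-- ===== CLAIM (what is proved, stated in full; the proofs are below) =====
def Claim_equal_analyze_single_a : Prop := ∀ (args : Int × Int × List Int × Int), Dom_analyze_single_a args → Spec_analyze_single_a args (analyze_single_a args)

-- ===== LEMMAS AND PROOFS =====

-- the iterated step map: pvSeq a b n i = the orbit value after i steps
def pvSeq (a b n : Int) (i : Nat) : Int := (pvStep a b)^[i] n

theorem pvSeq_zero (a b n : Int) : pvSeq a b n 0 = n := rfl

theorem pvSeq_succ (a b n : Int) (i : Nat) :
    pvSeq a b n (i + 1) = pvStep a b (pvSeq a b n i) :=
  Function.iterate_succ_apply' _ _ _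

theorem pvSeq_add (a b n : Int) (d x : Nat) :
    pvSeq a b n (d + x) = (pvStep a b)^[d] (pvSeq a b n x) :=
  Function.iterate_add_apply _ _ _ _

-- find? over List.range
theorem pvFind_range_none {p : Nat → Bool} {k : Nat} (h : ∀ i < k, p i = false) :
    (List.range k).find? p = none := by
  rw [List.find?_eq_none]
  intro x hx
  simp only [List.mem_range] at hx
  simp [h x hx]

theorem pvFind_range_some {p : Nat → Bool} {k j : Nat} (hj : j < k) (hp : p j = true)
    (hmin : ∀ i < j, p i = false) : (List.range k).find? p = some j := by
  induction k with
  | zero => omega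
  | succ k ih =>
    rw [List.range_succ, List.find?_append]
    by_cases hjk : j < k
    · rw [ih hjk]; rfl
    · have hjk' : j = k := by omega
      subst hjk'
      rw [pvFind_range_none hmin]
      simp [hp]

-- the dict invariant of A's loop: seen maps each value already visited to its first index
def pvSeenInv (a b n : Int) (s : Nat) (seen : PySem.Dict Int Int) : Prop :=
  ∀ v : Int, PySem.Dict.get? seen v =
    ((List.range s).find? (fun j => pvSeq a b n j == v)).map (fun j => (j : Int))

theorem pvSeenInv_empty (a b n : Int) : pvSeenInv a b n 0 PySem.Dict.empty := by
  intro v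
  simp [PySem.Dict.get?_empty, List.range_zero]

theorem pvSeenInv_step (a b n : Int) (s : Nat) (seen : PySem.Dict Int Int)
    (hinv : pvSeenInv a b n s seen)
    (hfresh : ∀ j < s, pvSeq a b n j ≠ pvSeq a b n s) :
    pvSeenInv a b n (s + 1) (PySem.Dict.insert seen (pvSeq a b n s) (s : Int)) := by
  intro v
  rw [PySem.Dict.get?_insert]
  rw [List.range_succ, List.find?_append]
  by_cases hv : v = pvSeq a b n s
  · subst hv
    rw [if_pos rfl]
    rw [pvFind_range_none (p := fun j => pvSeq a b n j == pvSeq a b n s)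
      (by intro i hi; simpa using hfresh i hi)]
    simp
  · rw [if_neg hv, hinv v]
    have hps : (pvSeq a b n s == v) = false := by
      simp only [beq_eq_false_iff_ne, ne_eq]
      exact fun h => hv h.symm
    have hsing : (List.find? (fun j => pvSeq a b n j == v) [s]) = none := by
      simp [List.find?, hps]
    rw [hsing]
    cases (List.range s).find? (fun j => pvSeq a b n j == v) <;> rfl

theorem pvContains_of_inv (a b n : Int) (s : Nat) (seen : PySem.Dict Int Int)
    (hinv : pvSeenInv a b n s seen) (v : Int) :
    PySem.Dict.contains seen v =
      ((List.range s).find? (fun j => pvSeq a b n j == v)).isSome := by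
  rw [PySem.Dict.contains_eq_isSome_get?, hinv v]
  cases (List.range s).find? (fun j => pvSeq a b n j == v) <;> rfl

-- ========== A-side loop characterization ==========

theorem pvLoopA_found (a b maxSteps n : Int) (K μ : Nat)
    (hnodup : ∀ k < K, ∀ j < k, pvSeq a b n j ≠ pvSeq a b n k)
    (hμK : μ < K) (hμeq : pvSeq a b n μ = pvSeq a b n K)
    (hμmin : ∀ j < μ, pvSeq a b n j ≠ pvSeq a b n K) :
    ∀ fuel s (seen : PySem.Dict Int Int) orbit, s + fuel = maxSteps.toNat → s ≤ K →
      pvSeenInv a b n s seen → orbit = (List.range s).map (pvSeq a b n) →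
      pvLoopA a b maxSteps fuel (pvSeq a b n s) seen orbit (s : Int) =
        (if K < maxSteps.toNat
          then some ((List.range K).map (pvSeq a b n), (μ : Int)) else none) := by
  intro fuel
  induction fuel with
  | zero =>
    intro s seen orbit hs hsK hinv horb
    rw [pvLoopA]
    unfold pvPostA
    rw [if_pos (by omega : (s : Int) ≥ maxSteps)]
    rw [if_neg (by omega : ¬ K < maxSteps.toNat)]
  | succ fuel ih =>
    intro s seen orbit hs hsK hinv horb
    rw [pvLoopA]
    by_cases hsKeq : s = K
    · subst hsKeq
      have hfind : (List.range s).find? (fun j => pvSeq a b n j == pvSeq a b n s) = some μ :=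
        pvFind_range_some (by omega) (by simp [hμeq]) (fun i hi => by simp [hμmin i hi])
      have hcont : PySem.Dict.contains seen (pvSeq a b n s) = true := by
        rw [pvContains_of_inv a b n s seen hinv, hfind]; rfl
      rw [if_neg (by simp [hcont])]
      unfold pvPostA
      have hKlt : s < maxSteps.toNat := by omega
      rw [if_neg (by omega : ¬ (s : Int) ≥ maxSteps)]
      rw [hinv, hfind, if_pos hKlt, horb]
      rfl
    · have hsK' : s < K := by omega
      have hfind : (List.range s).find? (fun j => pvSeq a b n j == pvSeq a b n s) = none :=
        pvFind_range_none (fun i hi => by simp [hnodup s hsK' i hi])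
      have hcont : PySem.Dict.contains seen (pvSeq a b n s) = false := by
        rw [pvContains_of_inv a b n s seen hinv, hfind]; rfl
      have hslt : (s : Int) < maxSteps := by omega
      rw [if_pos ⟨hcont, hslt⟩]
      have hstep : (if PySem.Int.mod (pvSeq a b n s) 2 = 0
          then PySem.Int.floordiv (pvSeq a b n s) 2 else a * (pvSeq a b n s) + b) =
          pvSeq a b n (s + 1) := by rw [pvSeq_succ]; rfl
      have hcast : (s : Int) + 1 = ((s + 1 : Nat) : Int) := by push_cast; ring
      rw [hstep, hcast]
      exact ih (s + 1) _ _ (by omega) (by omega)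
        (pvSeenInv_step a b n s seen hinv (hnodup s hsK'))
        (by simp [horb, List.range_succ])

theorem pvLoopA_inj (a b maxSteps n : Int)
    (hnodup : ∀ k, ∀ j < k, pvSeq a b n j ≠ pvSeq a b n k) :
    ∀ fuel s (seen : PySem.Dict Int Int) orbit, s + fuel = maxSteps.toNat →
      pvSeenInv a b n s seen →
      pvLoopA a b maxSteps fuel (pvSeq a b n s) seen orbit (s : Int) = none := by
  intro fuel
  induction fuel with
  | zero =>
    intro s seen orbit hs hinv
    rw [pvLoopA]
    unfold pvPostA
    rw [if_pos (by omega : (s : Int) ≥ maxSteps)]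
  | succ fuel ih =>
    intro s seen orbit hs hinv
    rw [pvLoopA]
    have hfind : (List.range s).find? (fun j => pvSeq a b n j == pvSeq a b n s) = none :=
      pvFind_range_none (fun i hi => by simp [hnodup s i hi])
    have hcont : PySem.Dict.contains seen (pvSeq a b n s) = false := by
      rw [pvContains_of_inv a b n s seen hinv, hfind]; rfl
    have hslt : (s : Int) < maxSteps := by omega
    rw [if_pos ⟨hcont, hslt⟩]
    have hstep : (if PySem.Int.mod (pvSeq a b n s) 2 = 0
        then PySem.Int.floordiv (pvSeq a b n s) 2 else a * (pvSeq a b n s) + b) =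
        pvSeq a b n (s + 1) := by rw [pvSeq_succ]; rfl
    have hcast : (s : Int) + 1 = ((s + 1 : Nat) : Int) := by push_cast; ring
    rw [hstep, hcast]
    exact ih (s + 1) _ _ (by omega) (pvSeenInv_step a b n s seen hinv (hnodup s))

-- ========== periodicity facts ==========

theorem pvPeriod (a b n : Int) (K μ : Nat) (hμK : μ < K)
    (hμeq : pvSeq a b n μ = pvSeq a b n K) :
    ∀ i, μ ≤ i → pvSeq a b n (i + (K - μ)) = pvSeq a b n i := by
  intro i hi
  obtain ⟨d, rfl⟩ : ∃ d, i = d + μ := ⟨i - μ, by omega⟩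
  have h1 : d + μ + (K - μ) = d + K := by omega
  rw [h1, pvSeq_add, ← hμeq, ← pvSeq_add]

theorem pvPeriodMul (a b n : Int) (K μ : Nat) (hμK : μ < K)
    (hμeq : pvSeq a b n μ = pvSeq a b n K) :
    ∀ c i, μ ≤ i → pvSeq a b n (i + c * (K - μ)) = pvSeq a b n i := by
  intro c
  induction c with
  | zero => simp
  | succ c ih =>
    intro i hi
    have h1 : i + (c + 1) * (K - μ) = (i + c * (K - μ)) + (K - μ) := by ring
    rw [h1, pvPeriod a b n K μ hμK hμeq _ (by omega), ih i hi]

theorem pvReduce (a b n : Int) (K μ : Nat) (hμK : μ < K)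
    (hμeq : pvSeq a b n μ = pvSeq a b n K) :
    ∀ q, μ ≤ q → pvSeq a b n q = pvSeq a b n (μ + (q - μ) % (K - μ)) ∧
      μ + (q - μ) % (K - μ) < K := by
  intro q hq
  have hlam : 0 < K - μ := by omega
  set e := (q - μ) % (K - μ) with he
  set m' := (q - μ) / (K - μ) with hm
  have hmod : e < K - μ := Nat.mod_lt (q - μ) hlam
  have hdm : (K - μ) * m' + e = q - μ := Nat.div_add_mod (q - μ) (K - μ)
  have hcm : (K - μ) * m' = m' * (K - μ) := Nat.mul_comm _ _
  have h1 : q = (μ + e) + m' * (K - μ) := by omega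
  constructor
  · conv_lhs => rw [h1]
    exact pvPeriodMul a b n K μ hμK hμeq m' (μ + e) (by omega)
  · omega

-- the first-repeat characterization of equalities in the orbit
theorem pvE_mp (a b n : Int) (K μ : Nat)
    (hnodup : ∀ k < K, ∀ j < k, pvSeq a b n j ≠ pvSeq a b n k)
    (hμK : μ < K) (hμeq : pvSeq a b n μ = pvSeq a b n K) :
    ∀ p q, p < q → pvSeq a b n p = pvSeq a b n q →
      μ ≤ p ∧ (K - μ) ∣ (q - p) := by
  intro p q hpq heq
  have hred := pvReduce a b n K μ hμK hμeq
  have hqK : K ≤ q := by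
    by_contra hq
    exact hnodup q (by omega) p hpq heq
  have hμp : μ ≤ p := by
    by_contra hp
    have hpμ : p < μ := by omega
    obtain ⟨he, hb⟩ := hred q (by omega)
    exact hnodup _ hb p (by omega) (heq.trans he)
  refine ⟨hμp, ?_⟩
  obtain ⟨hep, hbp⟩ := hred p hμp
  obtain ⟨heq2, hbq⟩ := hred q (by omega)
  have hr : μ + (p - μ) % (K - μ) = μ + (q - μ) % (K - μ) := by
    by_contra hne
    rcases Nat.lt_or_gt_of_ne hne with h | h
    · exact hnodup _ hbq _ h (hep.symm.trans (heq.trans heq2))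
    · exact hnodup _ hbp _ h (heq2.symm.trans (heq.symm.trans hep))
  have hmodeq : (p - μ) % (K - μ) = (q - μ) % (K - μ) := by omega
  have hdvd : (K - μ) ∣ (q - μ) - (p - μ) := (Nat.modEq_iff_dvd' (by omega)).mp hmodeq
  have h2 : (q - μ) - (p - μ) = q - p := by omega
  rwa [h2] at hdvd

theorem pvE_mpr (a b n : Int) (K μ : Nat) (hμK : μ < K)
    (hμeq : pvSeq a b n μ = pvSeq a b n K) :
    ∀ p q, μ ≤ p → p ≤ q → (K - μ) ∣ (q - p) → pvSeq a b n p = pvSeq a b n q := by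
  intro p q hμp hpq hdvd
  obtain ⟨c, hc⟩ := hdvd
  have h1 : q = p + c * (K - μ) := by
    rcases c with _ | c
    · omega
    · have : 0 < K - μ := by omega
      nlinarith [Nat.sub_add_cancel hpq]
  rw [h1, pvPeriodMul a b n K μ hμK hμeq _ _ hμp]

-- ========== B-side: the three Floyd phases ==========

theorem pvSeq_two_succ (a b n : Int) (i : Nat) :
    pvSeq a b n (2 * (i + 1)) = pvStep a b (pvStep a b (pvSeq a b n (2 * i))) := by
  have h : 2 * (i + 1) = (2 * i + 1) + 1 := by ring
  rw [h, pvSeq_succ, pvSeq_succ]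

theorem pvPhase1_sound (a b maxSteps n : Int) :
    ∀ fuel (iN : Nat) (v : Int), 1 ≤ iN →
      pvPhase1 a b maxSteps fuel (pvSeq a b n iN) (pvSeq a b n (2 * iN)) (iN : Int) = some v →
      ∃ j, iN ≤ j ∧ j ≤ iN + fuel ∧ pvSeq a b n j = pvSeq a b n (2 * j) ∧
        v = pvSeq a b n (2 * j) := by
  intro fuel
  induction fuel with
  | zero =>
    intro iN v h1 hres
    rw [pvPhase1] at hres
    by_cases he : pvSeq a b n iN = pvSeq a b n (2 * iN)
    · rw [if_pos he] at hres
      exact ⟨iN, le_refl _, by omega, he, (Option.some.inj hres).symm⟩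
    · rw [if_neg he] at hres
      split_ifs at hres
  | succ fuel ih =>
    intro iN v h1 hres
    rw [pvPhase1] at hres
    by_cases he : pvSeq a b n iN = pvSeq a b n (2 * iN)
    · rw [if_pos he] at hres
      exact ⟨iN, le_refl _, by omega, he, (Option.some.inj hres).symm⟩
    · rw [if_neg he] at hres
      split_ifs at hres with hge
      rw [← pvSeq_succ, ← pvSeq_two_succ,
        (by push_cast; ring : (iN : Int) + 1 = ((iN + 1 : Nat) : Int))] at hres
      obtain ⟨j, hj1, hj2, hj3, hj4⟩ := ih (iN + 1) v (by omega) hres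
      exact ⟨j, by omega, by omega, hj3, hj4⟩

theorem pvPhase1_none (a b maxSteps n : Int)
    (hno : ∀ j, 1 ≤ j → pvSeq a b n j ≠ pvSeq a b n (2 * j)) :
    ∀ fuel (iN : Nat), 1 ≤ iN →
      pvPhase1 a b maxSteps fuel (pvSeq a b n iN) (pvSeq a b n (2 * iN)) (iN : Int) = none := by
  intro fuel
  induction fuel with
  | zero =>
    intro iN h1
    rw [pvPhase1, if_neg (hno iN h1)]
    split_ifs <;> rfl
  | succ fuel ih =>
    intro iN h1
    rw [pvPhase1, if_neg (hno iN h1)]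
    split_ifs with hge
    · rfl
    · rw [← pvSeq_succ, ← pvSeq_two_succ,
        (by push_cast; ring : (iN : Int) + 1 = ((iN + 1 : Nat) : Int))]
      exact ih (iN + 1) (by omega)

theorem pvPhase1_isSome (a b maxSteps n : Int) :
    ∀ fuel (iN t : Nat), 1 ≤ iN → iN ≤ t →
      pvSeq a b n t = pvSeq a b n (2 * t) → (t : Int) < maxSteps → t - iN ≤ fuel →
      (pvPhase1 a b maxSteps fuel (pvSeq a b n iN) (pvSeq a b n (2 * iN)) (iN : Int)).isSome := by
  intro fuel
  induction fuel with
  | zero =>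
    intro iN t h1 hit hmeet hlt hfuel
    have ht : t = iN := by omega
    subst ht
    rw [pvPhase1, if_pos hmeet]
    rfl
  | succ fuel ih =>
    intro iN t h1 hit hmeet hlt hfuel
    rw [pvPhase1]
    by_cases he : pvSeq a b n iN = pvSeq a b n (2 * iN)
    · rw [if_pos he]; rfl
    · rw [if_neg he]
      have hiN : iN ≠ t := fun h => he (h ▸ hmeet)
      have hlt2 : ¬ ((iN : Int) ≥ maxSteps) := by
        have : iN < t := by omega
        omega
      rw [if_neg hlt2]
      rw [← pvSeq_succ, ← pvSeq_two_succ,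
        (by push_cast; ring : (iN : Int) + 1 = ((iN + 1 : Nat) : Int))]
      exact ih (iN + 1) t (by omega) (by omega) hmeet hlt (by omega)

theorem pvPhase2_eq (a b n : Int) (K μ : Nat)
    (hnodup : ∀ k < K, ∀ j < k, pvSeq a b n j ≠ pvSeq a b n k)
    (hμK : μ < K) (hμeq : pvSeq a b n μ = pvSeq a b n K)
    (c : Nat) (hc1 : 1 ≤ c) (hcdvd : (K - μ) ∣ c) :
    ∀ fuel (d : Nat), d ≤ μ → μ - d ≤ fuel →
      pvPhase2 a b fuel (pvSeq a b n d) (pvSeq a b n (c + d)) (d : Int) =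
        (pvSeq a b n μ, (μ : Int)) := by
  intro fuel
  induction fuel with
  | zero =>
    intro d hd hfuel
    have hdμ : d = μ := by omega
    subst hdμ
    rw [pvPhase2, if_pos (pvE_mpr a b n K _ hμK hμeq _ _ (le_refl _)
      (by omega) (by simpa using hcdvd))]
  | succ fuel ih =>
    intro d hd hfuel
    rw [pvPhase2]
    by_cases he : pvSeq a b n d = pvSeq a b n (c + d)
    · rw [if_pos he]
      have hμd : μ ≤ d :=
        (pvE_mp a b n K μ hnodup hμK hμeq d (c + d) (by omega) he).1
      have hdμ : d = μ := by omega
      subst hdμ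
      rfl
    · rw [if_neg he]
      have hdμ : d ≠ μ := by
        intro h
        subst h
        exact he (pvE_mpr a b n K _ hμK hμeq _ _ (le_refl _)
          (by omega) (by simpa using hcdvd))
      have hdlt : d < μ := by omega
      have hfa : pvSeq a b n (c + (d + 1)) = pvStep a b (pvSeq a b n (c + d)) := by
        rw [show c + (d + 1) = (c + d) + 1 from by ring, pvSeq_succ]
      rw [← pvSeq_succ, ← hfa,
        (by push_cast; ring : (d : Int) + 1 = ((d + 1 : Nat) : Int))]
      exact ih (d + 1) (by omega) (by omega)

theorem pvPhase3_eq (a b n : Int) (K μ : Nat)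
    (hnodup : ∀ k < K, ∀ j < k, pvSeq a b n j ≠ pvSeq a b n k)
    (hμK : μ < K) (hμeq : pvSeq a b n μ = pvSeq a b n K) :
    ∀ fuel (l : Nat), 1 ≤ l → l ≤ K - μ → (K - μ) - l ≤ fuel →
      pvPhase3 a b fuel (pvSeq a b n μ) (pvSeq a b n (μ + l)) (l : Int) =
        ((K - μ : Nat) : Int) := by
  intro fuel
  induction fuel with
  | zero =>
    intro l h1 hlK hfuel
    have hl : l = K - μ := by omega
    subst hl
    rw [pvPhase3, if_pos (pvPeriod a b n K μ hμK hμeq μ (le_refl _)).symm]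
  | succ fuel ih =>
    intro l h1 hlK hfuel
    rw [pvPhase3]
    by_cases he : pvSeq a b n μ = pvSeq a b n (μ + l)
    · rw [if_pos he]
      have hdvd : (K - μ) ∣ l := by
        have h := (pvE_mp a b n K μ hnodup hμK hμeq μ (μ + l) (by omega) he).2
        simpa using h
      have hle : K - μ ≤ l := Nat.le_of_dvd (by omega) hdvd
      have : l = K - μ := by omega
      subst this
      rfl
    · rw [if_neg he]
      have hlne : l ≠ K - μ := by
        intro h
        subst h
        exact he (pvPeriod a b n K μ hμK hμeq μ (le_refl _)).symm
      have hllt : l < K - μ := by omega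
      have hfa : pvSeq a b n (μ + (l + 1)) = pvStep a b (pvSeq a b n (μ + l)) := by
        rw [show μ + (l + 1) = (μ + l) + 1 from by ring, pvSeq_succ]
      rw [← hfa, (by push_cast; ring : (l : Int) + 1 = ((l + 1 : Nat) : Int))]
      exact ih (l + 1) (by omega) (by omega) (by omega)

theorem pvRegen_eq (a b : Int) :
    ∀ (k : Nat) (x : Int) (acc : List Int),
      pvRegen a b k x acc = acc ++ (List.range k).map (fun i => (pvStep a b)^[i] x) := by
  intro k
  induction k with
  | zero => intro x acc; simp [pvRegen]
  | succ k ih =>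
    intro x acc
    rw [pvRegen, ih, List.range_succ_eq_map, List.map_cons, List.map_map]
    have hcomp : ((fun i => (pvStep a b)^[i] x) ∘ Nat.succ) =
        fun i => (pvStep a b)^[i] (pvStep a b x) := by
      funext i; exact Function.iterate_succ_apply _ _ _
    rw [hcomp]
    simp [List.append_assoc]

-- Bool-valued duplicate test (for Nat.find)
def pvDupB (a b n : Int) (k : Nat) : Bool :=
  (List.range k).any (fun j => pvSeq a b n j == pvSeq a b n k)

theorem pvDupB_iff (a b n : Int) (k : Nat) :
    pvDupB a b n k = true ↔ ∃ j < k, pvSeq a b n j = pvSeq a b n k := by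
  simp [pvDupB]

theorem pvCollatzA_char (a b n maxSteps : Int) (K μ : Nat)
    (hnodup : ∀ k < K, ∀ j < k, pvSeq a b n j ≠ pvSeq a b n k)
    (hμK : μ < K) (hμeq : pvSeq a b n μ = pvSeq a b n K)
    (hμmin : ∀ j < μ, pvSeq a b n j ≠ pvSeq a b n K) :
    pvCollatzA a b n maxSteps =
      (if K < maxSteps.toNat
        then some ((List.range K).map (pvSeq a b n), (μ : Int)) else none) := by
  have h := pvLoopA_found a b maxSteps n K μ hnodup hμK hμeq hμmin maxSteps.toNat 0
    PySem.Dict.empty [] (by omega) (by omega) (pvSeenInv_empty a b n) (by simp)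
  simpa [pvCollatzA, pvSeq_zero] using h

theorem pvFloyd_char (a b n maxSteps : Int) (K μ : Nat)
    (hnodup : ∀ k < K, ∀ j < k, pvSeq a b n j ≠ pvSeq a b n k)
    (hμK : μ < K) (hμeq : pvSeq a b n μ = pvSeq a b n K) :
    pvFloyd a b n maxSteps =
      (if K < maxSteps.toNat
        then some ((List.range K).map (pvSeq a b n), (μ : Int)) else none) := by
  have hlam : 0 < K - μ := by omega
  have hsum : (μ : Int) + ((K - μ : Nat) : Int) = (K : Int) := by
    have : ((K - μ : Nat) : Int) = (K : Int) - (μ : Int) := by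
      push_cast [Nat.cast_sub (le_of_lt hμK)]; ring
    rw [this]; ring
  have main : ∀ v, pvPhase1 a b maxSteps maxSteps.toNat
      (pvStep a b n) (pvStep a b (pvStep a b n)) 1 = some v →
      pvFloyd a b n maxSteps =
        (if (K : Int) ≥ maxSteps then none
          else some ((List.range K).map (pvSeq a b n), (μ : Int))) := by
    intro v hv
    have hv' : pvPhase1 a b maxSteps maxSteps.toNat
        (pvSeq a b n 1) (pvSeq a b n (2 * 1)) ((1 : Nat) : Int) = some v := hv
    obtain ⟨j, hj1, hj2, hjmeet, hveq⟩ :=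
      pvPhase1_sound a b maxSteps n maxSteps.toNat 1 v (le_refl 1) hv'
    obtain ⟨hμj, hjdvd'⟩ := pvE_mp a b n K μ hnodup hμK hμeq j (2 * j) (by omega) hjmeet
    have hjdvd : (K - μ) ∣ j := by
      have h2 : 2 * j - j = j := by omega
      rwa [h2] at hjdvd'
    have hjlam : K - μ ≤ j := Nat.le_of_dvd (by omega) hjdvd
    have hp2 := pvPhase2_eq a b n K μ hnodup hμK hμeq (2 * j) (by omega)
      (hjdvd.mul_left 2) (maxSteps.toNat + 1) 0 (by omega) (by omega)
    have hp2' : pvPhase2 a b (maxSteps.toNat + 1) n v 0 = (pvSeq a b n μ, (μ : Int)) := by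
      rw [hveq]; exact hp2
    have hp3 := pvPhase3_eq a b n K μ hnodup hμK hμeq (maxSteps.toNat + 1) 1
      (le_refl 1) (by omega) (by omega)
    rw [pvSeq_succ] at hp3
    have hp3' : pvPhase3 a b (maxSteps.toNat + 1) (pvSeq a b n μ)
        (pvStep a b (pvSeq a b n μ)) 1 = ((K - μ : Nat) : Int) := hp3
    unfold pvFloyd
    rw [hv]
    simp only [hp2', hp3']
    simp only [hsum, Int.toNat_natCast]
    rw [pvRegen_eq]
    simp only [List.nil_append]
    rfl
  by_cases hKm : K < maxSteps.toNat
  · set t := (K - μ) * (μ / (K - μ) + 1) with ht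
    have htexp : t = (K - μ) * (μ / (K - μ)) + (K - μ) := by ring
    have hdm := Nat.div_add_mod μ (K - μ)
    have hmodlt := Nat.mod_lt μ hlam
    have htμ : μ < t := by omega
    have htK : t ≤ K := by omega
    have htdvd : (K - μ) ∣ t := Dvd.intro _ rfl
    have hmeet : pvSeq a b n t = pvSeq a b n (2 * t) :=
      pvE_mpr a b n K μ hμK hμeq t (2 * t) (by omega) (by omega)
        (by have h2 : 2 * t - t = t := by omega
            rw [h2]; exact htdvd)
    have hts : (t : Int) < maxSteps := by omega
    have hsome : (pvPhase1 a b maxSteps maxSteps.toNat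
        (pvStep a b n) (pvStep a b (pvStep a b n)) 1).isSome :=
      pvPhase1_isSome a b maxSteps n maxSteps.toNat 1 t (le_refl 1) (by omega)
        hmeet hts (by omega)
    obtain ⟨v, hv⟩ := Option.isSome_iff_exists.mp hsome
    rw [main v hv, if_neg (by omega : ¬ (K : Int) ≥ maxSteps), if_pos hKm]
  · rw [if_neg hKm]
    cases hv : pvPhase1 a b maxSteps maxSteps.toNat
        (pvStep a b n) (pvStep a b (pvStep a b n)) 1 with
    | none =>
      unfold pvFloyd
      rw [hv]
    | some v =>
      rw [main v hv, if_pos (by omega : (K : Int) ≥ maxSteps)]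

theorem pvCollatzA_eq_pvFloyd (a b n maxSteps : Int) :
    pvCollatzA a b n maxSteps = pvFloyd a b n maxSteps := by
  by_cases hdup : ∃ k, pvDupB a b n k = true
  · have hKspec : ∃ j < Nat.find hdup, pvSeq a b n j = pvSeq a b n (Nat.find hdup) :=
      (pvDupB_iff a b n _).mp (Nat.find_spec hdup)
    have hnodup : ∀ k < Nat.find hdup, ∀ j < k, pvSeq a b n j ≠ pvSeq a b n k := by
      intro k hk j hj heq
      exact Nat.find_min hdup hk ((pvDupB_iff a b n k).mpr ⟨j, hj, heq⟩)
    have hμex : ∃ j, pvSeq a b n j = pvSeq a b n (Nat.find hdup) := by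
      obtain ⟨j, _, hjeq⟩ := hKspec
      exact ⟨j, hjeq⟩
    have hμK : Nat.find hμex < Nat.find hdup := by
      obtain ⟨j, hjK, hjeq⟩ := hKspec
      exact lt_of_le_of_lt (Nat.find_le hjeq) hjK
    rw [pvCollatzA_char a b n maxSteps (Nat.find hdup) (Nat.find hμex) hnodup hμK
        (Nat.find_spec hμex) (fun j hj => Nat.find_min hμex hj),
      pvFloyd_char a b n maxSteps (Nat.find hdup) (Nat.find hμex) hnodup hμK
        (Nat.find_spec hμex)]
  · have hnodup : ∀ k, ∀ j < k, pvSeq a b n j ≠ pvSeq a b n k := by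
      intro k j hj heq
      exact hdup ⟨k, (pvDupB_iff a b n k).mpr ⟨j, hj, heq⟩⟩
    have hA : pvCollatzA a b n maxSteps = none := by
      have h := pvLoopA_inj a b maxSteps n hnodup maxSteps.toNat 0 PySem.Dict.empty []
        (by omega) (pvSeenInv_empty a b n)
      simpa [pvCollatzA, pvSeq_zero] using h
    have hB : pvFloyd a b n maxSteps = none := by
      have hno : ∀ j, 1 ≤ j → pvSeq a b n j ≠ pvSeq a b n (2 * j) :=
        fun j hj => hnodup (2 * j) j (by omega)
      have h : pvPhase1 a b maxSteps maxSteps.toNat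
          (pvStep a b n) (pvStep a b (pvStep a b n)) 1 = none :=
        pvPhase1_none a b maxSteps n hno maxSteps.toNat 1 (le_refl 1)
      unfold pvFloyd
      rw [h]
    rw [hA, hB]

-- ===== VERDICT (by name: the statement is the Claim_ definition above) =====
theorem analyze_single_a_spec : Claim_equal_analyze_single_a := by
  intro args _
  unfold Spec_analyze_single_a
  obtain ⟨a, b, seeds, ms⟩ := args
  have hbody : pvBodyA a b ms = pvBodyB a b ms := by
    funext st n
    unfold pvBodyA pvBodyB
    rw [pvCollatzA_eq_pvFloyd]
  simp only [analyze_single_a, analyze_single_a_alt, hbody]
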